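-- pv_equiv track=rewrite | github.com/maasoomraj/2x2-rubix-cube-AI | Cube.py | rotateBack
-- ===== SOURCE A (Python) =====
-- def rotateBack(currState, times):
--     state = []
--     for i in range(len(currState)):
--         s = []
--         for j in range(len(currState[0])):
--             s.append(currState[i][j])
--         state.append(s)
--
--     for i in range(times):
--         edge1 = state[2][3], state[2][1]
--         edge2 = state[1][3], state[1][1]
--         edge3 = state[5][0], state[5][2]
--         edge4 = state[3][3], state[3][1]
--
--         state[3][3], state[3][1] = edge3
--         state[5][0], state[5][2] = edge2
--         state[1][3], state[1][1] = edge1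
--         state[2][3], state[2][1] = edge4
--
--         square1 = state[4][2]
--         state[4][2] = state[4][3]
--         state[4][3] = state[4][1]
--         state[4][1] = state[4][0]
--         state[4][0] = square1
--     return state
-- ===== SOURCE B (Python) =====
-- def _back_src(i, j):
--     # source cell whose value lands in cell (i, j) after ONE backward rotation
--     if i == 3 and j == 3: return (5, 0)
--     if i == 3 and j == 1: return (5, 2)
--     if i == 5 and j == 0: return (1, 3)
--     if i == 5 and j == 2: return (1, 1)
--     if i == 1 and j == 3: return (2, 3)
--     if i == 1 and j == 1: return (2, 1)
--     if i == 2 and j == 3: return (3, 3)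
--     if i == 2 and j == 1: return (3, 1)
--     if i == 4 and j == 2: return (4, 3)
--     if i == 4 and j == 3: return (4, 1)
--     if i == 4 and j == 1: return (4, 0)
--     if i == 4 and j == 0: return (4, 2)
--     return (i, j)
--
--
-- # the 12 cells a backward rotation touches
-- _TARGETS = [(3, 3), (3, 1), (5, 0), (5, 2), (1, 3), (1, 1),
--             (2, 3), (2, 1), (4, 2), (4, 3), (4, 1), (4, 0)]
--
--
-- def rotateBack(currState, times):
--     # A rewrites every affected cell `times` times.  B instead composes the
--     # move's index permutation only times % 4 times (the move has period 4),
--     # bulk-copies the grid by row slicing, and writes each of the 12 affected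
--     # cells ONCE, straight from its source cell in the input.
--     if not currState:
--         return []
--     n = len(currState[0])
--     state = [row[:n] for row in currState]
--     k = times % 4 if times > 0 else 0
--     if k != 0:
--         for (ti, tj) in _TARGETS:
--             si, sj = ti, tj
--             for _ in range(k):
--                 si, sj = _back_src(si, sj)
--             state[ti][tj] = currState[si][sj]
--     return state
-- ===== Notes on version B (the rewrite author's own statement) =====
-- stated objective: faster
-- what changed: B never iterates the rotation over the state: it composes the move's index permutation only times % 4 times (the move has period 4), bulk-copies the grid by row slicing instead of cell-by-cell appends, and writes each of the 12 affected cells once straight from its source cell in the input.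
import Mathlib
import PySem

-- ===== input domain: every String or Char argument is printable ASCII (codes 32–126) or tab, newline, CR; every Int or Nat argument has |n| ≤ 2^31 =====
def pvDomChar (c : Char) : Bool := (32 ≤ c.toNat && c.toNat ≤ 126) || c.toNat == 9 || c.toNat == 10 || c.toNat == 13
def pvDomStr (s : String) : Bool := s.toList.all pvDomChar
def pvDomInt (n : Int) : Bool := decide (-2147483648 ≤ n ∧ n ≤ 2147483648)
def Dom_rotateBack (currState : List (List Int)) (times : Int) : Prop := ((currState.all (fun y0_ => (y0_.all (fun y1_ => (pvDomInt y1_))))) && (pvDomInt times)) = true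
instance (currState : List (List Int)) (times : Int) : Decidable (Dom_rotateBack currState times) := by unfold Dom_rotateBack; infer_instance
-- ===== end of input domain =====

-- B composes the back-move's index permutation only times % 4 times (the move has period 4),
-- bulk-copies the grid by row slicing, and writes each of the 12 affected cells once straight
-- from its source cell, instead of copying cell by cell and swapping cells `times` times as A does.

-- ===== PORT A =====
-- state[i][j] = v  (indices are literal non-negative and in range under Pre_; Python raises out of range — excluded by Pre_)
def pvSetCell (st : List (List Int)) (i j : Nat) (v : Int) : List (List Int) :=
  st.modify i (fun r => r.set j v)

-- the body of A's `for i in range(times)` loop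
def rotStepA (st : List (List Int)) : List (List Int) :=
  let edge1 := (PySem.List.pyGetD (PySem.List.pyGetD st 2 []) 3 0, PySem.List.pyGetD (PySem.List.pyGetD st 2 []) 1 0)
  let edge2 := (PySem.List.pyGetD (PySem.List.pyGetD st 1 []) 3 0, PySem.List.pyGetD (PySem.List.pyGetD st 1 []) 1 0)
  let edge3 := (PySem.List.pyGetD (PySem.List.pyGetD st 5 []) 0 0, PySem.List.pyGetD (PySem.List.pyGetD st 5 []) 2 0)
  let edge4 := (PySem.List.pyGetD (PySem.List.pyGetD st 3 []) 3 0, PySem.List.pyGetD (PySem.List.pyGetD st 3 []) 1 0)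
  let st := pvSetCell st 3 3 edge3.1
  let st := pvSetCell st 3 1 edge3.2
  let st := pvSetCell st 5 0 edge2.1
  let st := pvSetCell st 5 2 edge2.2
  let st := pvSetCell st 1 3 edge1.1
  let st := pvSetCell st 1 1 edge1.2
  let st := pvSetCell st 2 3 edge4.1
  let st := pvSetCell st 2 1 edge4.2
  let square1 := PySem.List.pyGetD (PySem.List.pyGetD st 4 []) 2 0
  let st := pvSetCell st 4 2 (PySem.List.pyGetD (PySem.List.pyGetD st 4 []) 3 0)
  let st := pvSetCell st 4 3 (PySem.List.pyGetD (PySem.List.pyGetD st 4 []) 1 0)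
  let st := pvSetCell st 4 1 (PySem.List.pyGetD (PySem.List.pyGetD st 4 []) 0 0)
  let st := pvSetCell st 4 0 square1
  st

def rotateBack (currState : List (List Int)) (times : Int) : List (List Int) :=
  let state := (PySem.List.pyRange 0 (currState.length : Int) 1).foldl
    (fun state i =>
      let s := (PySem.List.pyRange 0 ((PySem.List.pyGetD currState 0 []).length : Int) 1).foldl
        (fun s j => s ++ [PySem.List.pyGetD (PySem.List.pyGetD currState i []) j 0]) []
      state ++ [s]) []
  (PySem.List.pyRange 0 times 1).foldl (fun state _ => rotStepA state) state

-- ===== PORT B =====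
-- _back_src: the source cell whose value lands in cell (i, j) after ONE backward rotation
def backSrc (i j : Int) : Int × Int :=
  if i = 3 ∧ j = 3 then (5, 0) else
  if i = 3 ∧ j = 1 then (5, 2) else
  if i = 5 ∧ j = 0 then (1, 3) else
  if i = 5 ∧ j = 2 then (1, 1) else
  if i = 1 ∧ j = 3 then (2, 3) else
  if i = 1 ∧ j = 1 then (2, 1) else
  if i = 2 ∧ j = 3 then (3, 3) else
  if i = 2 ∧ j = 1 then (3, 1) else
  if i = 4 ∧ j = 2 then (4, 3) else
  if i = 4 ∧ j = 3 then (4, 1) else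
  if i = 4 ∧ j = 1 then (4, 0) else
  if i = 4 ∧ j = 0 then (4, 2) else (i, j)

-- the 12 cells a backward rotation touches
def pvTargets : List (Int × Int) := [(3,3),(3,1),(5,0),(5,2),(1,3),(1,1),(2,3),(2,1),(4,2),(4,3),(4,1),(4,0)]

-- state[ti][tj] = v  (exact for the non-negative in-range literal indices B uses)
def pvSetCellZ (st : List (List Int)) (i j : Int) (v : Int) : List (List Int) :=
  st.modify i.toNat (fun r => r.set j.toNat v)

def rotateBack_alt (currState : List (List Int)) (times : Int) : List (List Int) :=
  if currState = [] then [] else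
  let n : Int := ((PySem.List.pyGetD currState 0 []).length : Int)
  let state := currState.map (fun row => PySem.List.slice row none (some n))
  let k : Int := if 0 < times then PySem.Int.mod times 4 else 0
  if k ≠ 0 then
    pvTargets.foldl (fun st t =>
      let s := (PySem.List.pyRange 0 k 1).foldl (fun c _ => backSrc c.1 c.2) t
      pvSetCellZ st t.1 t.2 (PySem.List.pyGetD (PySem.List.pyGetD currState s.1 []) s.2 0)) state
  else state

-- ===== PRECONDITION & SPEC =====
-- Pre_ is exactly where Python A returns (no IndexError): every row at least as long as row 0
-- (the copy loop reads the first len(currState[0]) entries of each row), and if at least one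
-- rotation runs, at least 6 rows of length ≥ 4.
def Pre_rotateBack (currState : List (List Int)) (times : Int) : Prop :=
  (∀ r ∈ currState, (currState.headD []).length ≤ r.length) ∧
  (1 ≤ times → 6 ≤ currState.length ∧ 4 ≤ (currState.headD []).length)
instance (currState : List (List Int)) (times : Int) : Decidable (Pre_rotateBack currState times) := by unfold Pre_rotateBack; infer_instance

def pvWitness_rotateBack : List (List Int) × Int :=
  ([[0,1,2,3],[4,5,6,7],[8,9,10,11],[12,13,14,15],[16,17,18,19],[20,21,22,23]], 1)

def Spec_rotateBack (currState : List (List Int)) (times : Int) (out : List (List Int)) : Prop := out = rotateBack_alt currState times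
instance (currState : List (List Int)) (times : Int) (out : List (List Int)) : Decidable (Spec_rotateBack currState times out) := by unfold Spec_rotateBack; infer_instance

-- ===== CLAIM (what is proved, stated in full; the proofs are below) =====
def Claim_equal_rotateBack : Prop := ∀ (currState : List (List Int)) (times : Int), Dom_rotateBack currState times → Pre_rotateBack currState times → Spec_rotateBack currState times (rotateBack currState times)

-- ===== LEMMAS AND PROOFS =====

-- proof-side mirror of the permutation over Nat indices
def srcN (i j : Nat) : Nat × Nat :=
  if i = 3 ∧ j = 3 then (5, 0) else
  if i = 3 ∧ j = 1 then (5, 2) else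
  if i = 5 ∧ j = 0 then (1, 3) else
  if i = 5 ∧ j = 2 then (1, 1) else
  if i = 1 ∧ j = 3 then (2, 3) else
  if i = 1 ∧ j = 1 then (2, 1) else
  if i = 2 ∧ j = 3 then (3, 3) else
  if i = 2 ∧ j = 1 then (3, 1) else
  if i = 4 ∧ j = 2 then (4, 3) else
  if i = 4 ∧ j = 3 then (4, 1) else
  if i = 4 ∧ j = 1 then (4, 0) else
  if i = 4 ∧ j = 0 then (4, 2) else (i, j)

def srcStep (c : Nat × Nat) : Nat × Nat := srcN c.1 c.2

def cellN (cs : List (List Int)) (c : Nat × Nat) : Int := (cs.getD c.1 []).getD c.2 0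

-- gather form: row i, column j of the output reads cell σ (i, j) of cs
def Gath (cs : List (List Int)) (L n : Nat) (σ : Nat × Nat → Nat × Nat) : List (List Int) :=
  (List.range L).map (fun i => (List.range n).map (fun j => cellN cs (σ (i, j))))

lemma srcN_fix (i j : Nat) (h : i = 0 ∨ 6 ≤ i ∨ 4 ≤ j) : srcN i j = (i, j) := by
  unfold srcN
  rw [if_neg (by omega), if_neg (by omega), if_neg (by omega), if_neg (by omega),
      if_neg (by omega), if_neg (by omega), if_neg (by omega), if_neg (by omega),
      if_neg (by omega), if_neg (by omega), if_neg (by omega), if_neg (by omega)]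

lemma srcStep_fix (c : Nat × Nat) (h : c.1 = 0 ∨ 6 ≤ c.1 ∨ 4 ≤ c.2) : srcStep c = c := by
  obtain ⟨i, j⟩ := c
  exact srcN_fix i j h

lemma srcStep_period (c : Nat × Nat) : srcStep (srcStep (srcStep (srcStep c))) = c := by
  obtain ⟨i, j⟩ := c
  by_cases h : i = 0 ∨ 6 ≤ i ∨ 4 ≤ j
  · rw [srcStep_fix (i, j) h, srcStep_fix (i, j) h, srcStep_fix (i, j) h, srcStep_fix (i, j) h]
  · have h1 : 1 ≤ i := by omega
    have h5 : i ≤ 5 := by omega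
    have hj : j ≤ 3 := by omega
    interval_cases i <;> interval_cases j <;> decide

lemma srcStep_iter_mod (m : Nat) (c : Nat × Nat) : srcStep^[m] c = srcStep^[m % 4] c := by
  induction m using Nat.strong_induction_on with
  | _ m ih =>
    by_cases h4 : m < 4
    · rw [Nat.mod_eq_of_lt h4]
    · have hm : m = (m - 4) + 4 := by omega
      have h4s : srcStep^[4] c = c := by
        show srcStep (srcStep (srcStep (srcStep c))) = c
        exact srcStep_period c
      rw [hm, Function.iterate_add_apply, h4s, ih (m - 4) (by omega)]
      congr 1
      omega

lemma backSrc_cast (i j : Nat) :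
    backSrc (i : Int) (j : Int) = (((srcN i j).1 : Int), ((srcN i j).2 : Int)) := by
  by_cases h : i = 0 ∨ 6 ≤ i ∨ 4 ≤ j
  · rw [srcN_fix i j h]
    unfold backSrc
    rw [if_neg (by omega), if_neg (by omega), if_neg (by omega), if_neg (by omega),
        if_neg (by omega), if_neg (by omega), if_neg (by omega), if_neg (by omega),
        if_neg (by omega), if_neg (by omega), if_neg (by omega), if_neg (by omega)]
  · have h1 : 1 ≤ i := by omega
    have h5 : i ≤ 5 := by omega
    have hj : j ≤ 3 := by omega
    interval_cases i <;> interval_cases j <;> decide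

lemma iter_cast (m : Nat) (i j : Nat) :
    (fun c : Int × Int => backSrc c.1 c.2)^[m] ((i : Int), (j : Int))
      = (((srcStep^[m] (i, j)).1 : Int), ((srcStep^[m] (i, j)).2 : Int)) := by
  induction m generalizing i j with
  | zero => rfl
  | succ m ih =>
    rw [Function.iterate_succ_apply, Function.iterate_succ_apply]
    show (fun c : Int × Int => backSrc c.1 c.2)^[m] (backSrc (i : Int) (j : Int)) = _
    rw [backSrc_cast]
    rcases hab : srcN i j with ⟨a, b⟩
    have hstep : srcStep (i, j) = (a, b) := hab
    rw [ih a b, hstep]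

lemma foldl_const_iterate {α β : Type} (f : α → α) (l : List β) (x : α) :
    l.foldl (fun s _ => f s) x = f^[l.length] x := by
  induction l generalizing x with
  | nil => rfl
  | cons a l ih => simp [List.foldl_cons, ih, Function.iterate_succ_apply]

lemma stepA_eval (r0 : List Int) (a1 b1 c1 d1 : Int) (t1 : List Int) (a2 b2 c2 d2 : Int) (t2 : List Int)
    (a3 b3 c3 d3 : Int) (t3 : List Int) (a4 b4 c4 d4 : Int) (t4 : List Int)
    (a5 b5 c5 d5 : Int) (t5 : List Int) (rest : List (List Int)) :
    rotStepA (r0 :: (a1::b1::c1::d1::t1) :: (a2::b2::c2::d2::t2) :: (a3::b3::c3::d3::t3)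
          :: (a4::b4::c4::d4::t4) :: (a5::b5::c5::d5::t5) :: rest)
    = r0 :: (a1::b2::c1::d2::t1) :: (a2::b3::c2::d3::t2) :: (a3::c5::c3::a5::t3)
          :: (c4::a4::d4::b4::t4) :: (d1::b5::b1::d5::t5) :: rest := by
  simp [rotStepA, pvSetCell, PySem.List.pyGetD_ofNat', List.getD, List.modify, List.set]

lemma gath_step (cs : List (List Int)) (L n : Nat) (σ : Nat × Nat → Nat × Nat)
    (hL : 6 ≤ L) (hn : 4 ≤ n) :
    rotStepA (Gath cs L n σ) = Gath cs L n (fun c => σ (srcStep c)) := by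
  obtain ⟨m, rfl⟩ : ∃ m, L = 6 + m := ⟨L - 6, by omega⟩
  obtain ⟨p, rfl⟩ : ∃ p, n = 4 + p := ⟨n - 4, by omega⟩
  have hrow : ∀ (τ : Nat × Nat → Nat × Nat) (i : Nat),
      (List.range (4 + p)).map (fun j => cellN cs (τ (i, j)))
        = cellN cs (τ (i, 0)) :: cellN cs (τ (i, 1)) :: cellN cs (τ (i, 2)) :: cellN cs (τ (i, 3))
          :: (List.range p).map (fun j => cellN cs (τ (i, 4 + j))) := by
    intro τ i
    rw [show List.range (4 + p) = List.range 4 ++ (List.range p).map (fun x => 4 + x) from List.range_add, List.map_append, List.map_map]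
    rfl
  have hgrid : ∀ (τ : Nat × Nat → Nat × Nat),
      Gath cs (6 + m) (4 + p) τ
        = ((List.range (4+p)).map (fun j => cellN cs (τ (0, j))))
          :: ((List.range (4+p)).map (fun j => cellN cs (τ (1, j))))
          :: ((List.range (4+p)).map (fun j => cellN cs (τ (2, j))))
          :: ((List.range (4+p)).map (fun j => cellN cs (τ (3, j))))
          :: ((List.range (4+p)).map (fun j => cellN cs (τ (4, j))))
          :: ((List.range (4+p)).map (fun j => cellN cs (τ (5, j))))
          :: (List.range m).map (fun i => (List.range (4+p)).map (fun j => cellN cs (τ (6 + i, j)))) := by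
    intro τ
    unfold Gath
    rw [show List.range (6 + m) = List.range 6 ++ (List.range m).map (fun x => 6 + x) from List.range_add, List.map_append, List.map_map]
    rfl
  have htail : ∀ (i : Nat),
      (List.range p).map (fun j => cellN cs (σ (srcStep (i, 4 + j))))
        = (List.range p).map (fun j => cellN cs (σ (i, 4 + j))) := by
    intro i
    apply List.map_congr_left
    intro j _
    rw [srcStep_fix (i, 4 + j) (by right; right; omega)]
  have hrest :
      (List.range m).map (fun i => (List.range (4+p)).map (fun j => cellN cs (σ (srcStep (6 + i, j)))))
        = (List.range m).map (fun i => (List.range (4+p)).map (fun j => cellN cs (σ (6 + i, j)))) := by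
    apply List.map_congr_left
    intro i _
    apply List.map_congr_left
    intro j _
    rw [srcStep_fix (6 + i, j) (by right; left; omega)]
  have hrow0 :
      (List.range (4+p)).map (fun j => cellN cs (σ (srcStep (0, j))))
        = (List.range (4+p)).map (fun j => cellN cs (σ (0, j))) := by
    apply List.map_congr_left
    intro j _
    rw [srcStep_fix (0, j) (by left; rfl)]
  rw [hgrid σ, hgrid (fun c => σ (srcStep c))]
  rw [hrow σ 1, hrow σ 2, hrow σ 3, hrow σ 4, hrow σ 5]
  rw [stepA_eval]
  rw [hrow (fun c => σ (srcStep c)) 1, hrow (fun c => σ (srcStep c)) 2,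
      hrow (fun c => σ (srcStep c)) 3, hrow (fun c => σ (srcStep c)) 4,
      hrow (fun c => σ (srcStep c)) 5]
  rw [hrow0, htail 1, htail 2, htail 3, htail 4, htail 5, hrest]
  rw [show srcStep (1, 0) = (1, 0) from by decide, show srcStep (1, 1) = (2, 1) from by decide,
      show srcStep (1, 2) = (1, 2) from by decide, show srcStep (1, 3) = (2, 3) from by decide,
      show srcStep (2, 0) = (2, 0) from by decide, show srcStep (2, 1) = (3, 1) from by decide,
      show srcStep (2, 2) = (2, 2) from by decide, show srcStep (2, 3) = (3, 3) from by decide,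
      show srcStep (3, 0) = (3, 0) from by decide, show srcStep (3, 1) = (5, 2) from by decide,
      show srcStep (3, 2) = (3, 2) from by decide, show srcStep (3, 3) = (5, 0) from by decide,
      show srcStep (4, 0) = (4, 2) from by decide, show srcStep (4, 1) = (4, 0) from by decide,
      show srcStep (4, 2) = (4, 3) from by decide, show srcStep (4, 3) = (4, 1) from by decide,
      show srcStep (5, 0) = (1, 3) from by decide, show srcStep (5, 1) = (5, 1) from by decide,
      show srcStep (5, 2) = (1, 1) from by decide, show srcStep (5, 3) = (5, 3) from by decide]

lemma gath_iterate (cs : List (List Int)) (L n : Nat) (hL : 6 ≤ L) (hn : 4 ≤ n)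
    (m : Nat) (σ : Nat × Nat → Nat × Nat) :
    rotStepA^[m] (Gath cs L n σ) = Gath cs L n (fun c => σ (srcStep^[m] c)) := by
  induction m generalizing σ with
  | zero => rfl
  | succ m ih =>
    rw [Function.iterate_succ_apply, gath_step cs L n σ hL hn, ih]
    congr 1
    funext c
    exact congrArg σ (Function.iterate_succ_apply' srcStep m c).symm

lemma map_range_getD (r : List Int) (n : Nat) (h : n ≤ r.length) :
    (List.range n).map (fun j => r.getD j 0) = r.take n := by
  apply List.ext_getElem
  · simp [h]
  · intro i h1 h2
    have hi : i < r.length := by simp at h2; omega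
    simp_all [List.getD_eq_getElem?_getD]

lemma gath_id (cs : List (List Int)) (n : Nat) (hrows : ∀ r ∈ cs, n ≤ r.length) :
    Gath cs cs.length n (fun c => c) = cs.map (fun r => r.take n) := by
  unfold Gath cellN
  apply List.ext_getElem
  · simp
  · intro i h1 h2
    have hic : i < cs.length := by simpa using h2
    simp only [List.getElem_map, List.getElem_range]
    have hD : cs.getD i [] = cs[i] := by
      rw [List.getD_eq_getElem?_getD, List.getElem?_eq_getElem hic]; rfl
    calc (List.range n).map (fun j => (cs.getD ((i, j).1) []).getD ((i, j).2) 0)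
        = (List.range n).map (fun j => cs[i].getD j 0) := by
          apply List.map_congr_left; intro j _; rw [hD]
      _ = cs[i].take n := map_range_getD _ _ (hrows _ (List.getElem_mem hic))

lemma copy_eq (cs : List (List Int)) (h : ∀ r ∈ cs, (PySem.List.pyGetD cs 0 ([]:List Int)).length ≤ r.length) :
    (PySem.List.pyRange 0 (cs.length : Int) 1).foldl
      (fun state i =>
        state ++ [(PySem.List.pyRange 0 ((PySem.List.pyGetD cs 0 []).length : Int) 1).foldl
          (fun s j => s ++ [PySem.List.pyGetD (PySem.List.pyGetD cs i []) j 0]) []]) []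
    = cs.map (fun row => (row.take (PySem.List.pyGetD cs 0 ([]:List Int)).length)) := by
  simp only [PySem.List.foldl_append_singleton_eq_map, List.nil_append]
  have hinner : ∀ r ∈ cs,
      (PySem.List.pyRange 0 ((PySem.List.pyGetD cs 0 ([]:List Int)).length : Int) 1).map
        (fun j => PySem.List.pyGetD r j 0)
      = r.take (PySem.List.pyGetD cs 0 ([]:List Int)).length := by
    intro r hr
    rw [PySem.List.pyRange_zero_natCast, List.map_map]
    simp only [Function.comp_def, PySem.List.pyGetD_natCast]
    exact map_range_getD r _ (h r hr)
  calc (PySem.List.pyRange 0 (cs.length : Int) 1).map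
        (fun i => (PySem.List.pyRange 0 ((PySem.List.pyGetD cs 0 ([]:List Int)).length : Int) 1).map
          (fun j => PySem.List.pyGetD (PySem.List.pyGetD cs i []) j 0))
      = (PySem.List.pyRange 0 (cs.length : Int) 1).map
        (fun i => (PySem.List.pyGetD cs i ([]:List Int)).take (PySem.List.pyGetD cs 0 ([]:List Int)).length) := by
        apply List.map_congr_left
        intro i hi
        rw [PySem.List.mem_pyRange_one] at hi
        exact hinner _ (PySem.List.pyGetD_mem _ _ (by simp [PySem.Raise.InRange]; omega))
    _ = ((PySem.List.pyRange 0 (cs.length : Int) 1).map (fun i => PySem.List.pyGetD cs i ([]:List Int))).map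
        (fun r => r.take (PySem.List.pyGetD cs 0 ([]:List Int)).length) := by rw [List.map_map]; rfl
    _ = cs.map (fun r => r.take (PySem.List.pyGetD cs 0 ([]:List Int)).length) := by
        rw [PySem.List.map_pyGetD_pyRange_zero']

lemma srcK_eval (k : Int) (i j : Nat) :
    (PySem.List.pyRange 0 k 1).foldl (fun c (_ : Int) => backSrc c.1 c.2) ((i : Int), (j : Int))
      = (((srcStep^[k.toNat] (i, j)).1 : Int), ((srcStep^[k.toNat] (i, j)).2 : Int)) := by
  rw [foldl_const_iterate, PySem.List.length_pyRange_one]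
  simp only [Int.sub_zero]
  exact iter_cast _ i j

lemma srcIter_fix (m : Nat) (c : Nat × Nat) (h : srcStep c = c) : srcStep^[m] c = c :=
  Function.iterate_fixed h m

lemma patch_gath (cs : List (List Int)) (k : Int) (L n : Nat) (hL : 6 ≤ L) (hn : 4 ≤ n) :
    pvTargets.foldl (fun st t =>
      pvSetCellZ st t.1 t.2
        (PySem.List.pyGetD (PySem.List.pyGetD cs
            (((PySem.List.pyRange 0 k 1).foldl (fun c _ => backSrc c.1 c.2) t).1) [])
          (((PySem.List.pyRange 0 k 1).foldl (fun c _ => backSrc c.1 c.2) t).2) 0))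
      (Gath cs L n (fun c => c))
    = Gath cs L n (fun c => srcStep^[k.toNat] c) := by
  obtain ⟨m, rfl⟩ : ∃ m, L = 6 + m := ⟨L - 6, by omega⟩
  obtain ⟨p, rfl⟩ : ∃ p, n = 4 + p := ⟨n - 4, by omega⟩
  have hrow : ∀ (τ : Nat × Nat → Nat × Nat) (i : Nat),
      (List.range (4 + p)).map (fun j => cellN cs (τ (i, j)))
        = cellN cs (τ (i, 0)) :: cellN cs (τ (i, 1)) :: cellN cs (τ (i, 2)) :: cellN cs (τ (i, 3))
          :: (List.range p).map (fun j => cellN cs (τ (i, 4 + j))) := by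
    intro τ i
    rw [show List.range (4 + p) = List.range 4 ++ (List.range p).map (fun x => 4 + x) from List.range_add, List.map_append, List.map_map]
    rfl
  have hgrid : ∀ (τ : Nat × Nat → Nat × Nat),
      Gath cs (6 + m) (4 + p) τ
        = ((List.range (4+p)).map (fun j => cellN cs (τ (0, j))))
          :: ((List.range (4+p)).map (fun j => cellN cs (τ (1, j))))
          :: ((List.range (4+p)).map (fun j => cellN cs (τ (2, j))))
          :: ((List.range (4+p)).map (fun j => cellN cs (τ (3, j))))
          :: ((List.range (4+p)).map (fun j => cellN cs (τ (4, j))))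
          :: ((List.range (4+p)).map (fun j => cellN cs (τ (5, j))))
          :: (List.range m).map (fun i => (List.range (4+p)).map (fun j => cellN cs (τ (6 + i, j)))) := by
    intro τ
    unfold Gath
    rw [show List.range (6 + m) = List.range 6 ++ (List.range m).map (fun x => 6 + x) from List.range_add, List.map_append, List.map_map]
    rfl
  have htail : ∀ (i : Nat),
      (List.range p).map (fun j => cellN cs (srcStep^[k.toNat] (i, 4 + j)))
        = (List.range p).map (fun j => cellN cs (i, 4 + j)) := by
    intro i
    apply List.map_congr_left
    intro j _
    rw [srcIter_fix k.toNat (i, 4 + j) (srcStep_fix (i, 4 + j) (by right; right; omega))]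
  have hrest :
      (List.range m).map (fun i => (List.range (4+p)).map (fun j => cellN cs (srcStep^[k.toNat] (6 + i, j))))
        = (List.range m).map (fun i => (List.range (4+p)).map (fun j => cellN cs (6 + i, j))) := by
    apply List.map_congr_left
    intro i _
    apply List.map_congr_left
    intro j _
    rw [srcIter_fix k.toNat (6 + i, j) (srcStep_fix (6 + i, j) (by right; left; omega))]
  have hrow0 :
      (List.range (4+p)).map (fun j => cellN cs (srcStep^[k.toNat] (0, j)))
        = (List.range (4+p)).map (fun j => cellN cs (0, j)) := by
    apply List.map_congr_left
    intro j _
    rw [srcIter_fix k.toNat (0, j) (srcStep_fix (0, j) (by left; rfl))]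
  have h33 : (PySem.List.pyRange 0 k 1).foldl (fun c (_ : Int) => backSrc c.1 c.2) ((3:Int),(3:Int))
      = (((srcStep^[k.toNat] (3,3)).1 : Int), ((srcStep^[k.toNat] (3,3)).2 : Int)) := srcK_eval k 3 3
  have h31 : (PySem.List.pyRange 0 k 1).foldl (fun c (_ : Int) => backSrc c.1 c.2) ((3:Int),(1:Int))
      = (((srcStep^[k.toNat] (3,1)).1 : Int), ((srcStep^[k.toNat] (3,1)).2 : Int)) := srcK_eval k 3 1
  have h50 : (PySem.List.pyRange 0 k 1).foldl (fun c (_ : Int) => backSrc c.1 c.2) ((5:Int),(0:Int))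
      = (((srcStep^[k.toNat] (5,0)).1 : Int), ((srcStep^[k.toNat] (5,0)).2 : Int)) := srcK_eval k 5 0
  have h52 : (PySem.List.pyRange 0 k 1).foldl (fun c (_ : Int) => backSrc c.1 c.2) ((5:Int),(2:Int))
      = (((srcStep^[k.toNat] (5,2)).1 : Int), ((srcStep^[k.toNat] (5,2)).2 : Int)) := srcK_eval k 5 2
  have h13 : (PySem.List.pyRange 0 k 1).foldl (fun c (_ : Int) => backSrc c.1 c.2) ((1:Int),(3:Int))
      = (((srcStep^[k.toNat] (1,3)).1 : Int), ((srcStep^[k.toNat] (1,3)).2 : Int)) := srcK_eval k 1 3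
  have h11 : (PySem.List.pyRange 0 k 1).foldl (fun c (_ : Int) => backSrc c.1 c.2) ((1:Int),(1:Int))
      = (((srcStep^[k.toNat] (1,1)).1 : Int), ((srcStep^[k.toNat] (1,1)).2 : Int)) := srcK_eval k 1 1
  have h23 : (PySem.List.pyRange 0 k 1).foldl (fun c (_ : Int) => backSrc c.1 c.2) ((2:Int),(3:Int))
      = (((srcStep^[k.toNat] (2,3)).1 : Int), ((srcStep^[k.toNat] (2,3)).2 : Int)) := srcK_eval k 2 3
  have h21 : (PySem.List.pyRange 0 k 1).foldl (fun c (_ : Int) => backSrc c.1 c.2) ((2:Int),(1:Int))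
      = (((srcStep^[k.toNat] (2,1)).1 : Int), ((srcStep^[k.toNat] (2,1)).2 : Int)) := srcK_eval k 2 1
  have h42 : (PySem.List.pyRange 0 k 1).foldl (fun c (_ : Int) => backSrc c.1 c.2) ((4:Int),(2:Int))
      = (((srcStep^[k.toNat] (4,2)).1 : Int), ((srcStep^[k.toNat] (4,2)).2 : Int)) := srcK_eval k 4 2
  have h43 : (PySem.List.pyRange 0 k 1).foldl (fun c (_ : Int) => backSrc c.1 c.2) ((4:Int),(3:Int))
      = (((srcStep^[k.toNat] (4,3)).1 : Int), ((srcStep^[k.toNat] (4,3)).2 : Int)) := srcK_eval k 4 3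
  have h41 : (PySem.List.pyRange 0 k 1).foldl (fun c (_ : Int) => backSrc c.1 c.2) ((4:Int),(1:Int))
      = (((srcStep^[k.toNat] (4,1)).1 : Int), ((srcStep^[k.toNat] (4,1)).2 : Int)) := srcK_eval k 4 1
  have h40 : (PySem.List.pyRange 0 k 1).foldl (fun c (_ : Int) => backSrc c.1 c.2) ((4:Int),(0:Int))
      = (((srcStep^[k.toNat] (4,0)).1 : Int), ((srcStep^[k.toNat] (4,0)).2 : Int)) := srcK_eval k 4 0
  rw [hgrid (fun c => c), hgrid (fun c => srcStep^[k.toNat] c)]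
  rw [hrow (fun c => c) 1, hrow (fun c => c) 2, hrow (fun c => c) 3,
      hrow (fun c => c) 4, hrow (fun c => c) 5]
  rw [hrow (fun c => srcStep^[k.toNat] c) 1, hrow (fun c => srcStep^[k.toNat] c) 2,
      hrow (fun c => srcStep^[k.toNat] c) 3, hrow (fun c => srcStep^[k.toNat] c) 4,
      hrow (fun c => srcStep^[k.toNat] c) 5]
  simp only [List.foldl_cons, List.foldl_nil, pvTargets]
  rw [h33, h31, h50, h52, h13, h11, h23, h21, h42, h43, h41, h40]
  simp only [PySem.List.pyGetD_natCast]
  simp only [hrow0, htail 1, htail 2, htail 3, htail 4, htail 5, hrest]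
  rw [srcIter_fix k.toNat (1, 0) (by decide), srcIter_fix k.toNat (1, 2) (by decide),
      srcIter_fix k.toNat (2, 0) (by decide), srcIter_fix k.toNat (2, 2) (by decide),
      srcIter_fix k.toNat (3, 0) (by decide), srcIter_fix k.toNat (3, 2) (by decide),
      srcIter_fix k.toNat (5, 1) (by decide), srcIter_fix k.toNat (5, 3) (by decide)]
  simp only [pvSetCellZ, show (0:Int).toNat = 0 from rfl, show (1:Int).toNat = 1 from rfl,
      show (2:Int).toNat = 2 from rfl, show (3:Int).toNat = 3 from rfl,
      show (4:Int).toNat = 4 from rfl, show (5:Int).toNat = 5 from rfl]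
  simp [List.modify, List.set, cellN]

-- ===== VERDICT (by name: the statement is the Claim_ definition above) =====
theorem rotateBack_spec : Claim_equal_rotateBack := by
  intro cs times _hdom hpre
  obtain ⟨hrows, hsh⟩ := hpre
  unfold Spec_rotateBack
  rcases hcs : cs with _ | ⟨c0, cs'⟩
  · -- empty state: Pre_ forces times ≤ 0, both sides are []
    have ht : times ≤ 0 := by
      by_contra hc
      have h6 := (hsh (by omega)).1
      rw [hcs] at h6
      simp at h6
    subst hcs
    unfold rotateBack rotateBack_alt
    simp [PySem.List.pyRange_one_eq_nil (by omega : times ≤ (0:Int))]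
  · rw [← hcs]
    have hne : cs ≠ [] := by rw [hcs]; exact List.cons_ne_nil _ _
    have hhead : PySem.List.pyGetD cs 0 ([]:List Int) = cs.headD [] := by
      rw [hcs, PySem.List.pyGetD_zero_cons]; rfl
    have hrows' : ∀ r ∈ cs, (PySem.List.pyGetD cs 0 ([]:List Int)).length ≤ r.length := by
      intro r hr
      rw [hhead]; exact hrows r hr
    have hA : rotateBack cs times
        = rotStepA^[times.toNat] (cs.map (fun r => r.take (PySem.List.pyGetD cs 0 ([]:List Int)).length)) := by
      unfold rotateBack
      rw [copy_eq cs hrows', foldl_const_iterate, PySem.List.length_pyRange_one]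
      simp only [Int.sub_zero]
    have hB : rotateBack_alt cs times
        = (if (if 0 < times then PySem.Int.mod times 4 else 0) ≠ 0 then
            pvTargets.foldl (fun st t =>
              pvSetCellZ st t.1 t.2
                (PySem.List.pyGetD (PySem.List.pyGetD cs
                    (((PySem.List.pyRange 0 (if 0 < times then PySem.Int.mod times 4 else 0) 1).foldl
                        (fun c _ => backSrc c.1 c.2) t).1) [])
                  (((PySem.List.pyRange 0 (if 0 < times then PySem.Int.mod times 4 else 0) 1).foldl
                        (fun c _ => backSrc c.1 c.2) t).2) 0))
              (cs.map (fun r => r.take (PySem.List.pyGetD cs 0 ([]:List Int)).length))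
          else cs.map (fun r => r.take (PySem.List.pyGetD cs 0 ([]:List Int)).length)) := by
      unfold rotateBack_alt
      rw [if_neg hne]
      simp only [PySem.List.slice_to_natCast]
    rw [hA, hB]
    by_cases hk : (if 0 < times then PySem.Int.mod times 4 else 0) = 0
    · rw [if_neg (not_not_intro hk)]
      by_cases ht : 0 < times
      · -- times > 0 with times % 4 = 0: the 4-periodic loop is a no-op
        have h6 : 6 ≤ cs.length := (hsh (by omega)).1
        have h4 : 4 ≤ (PySem.List.pyGetD cs 0 ([]:List Int)).length := by
          rw [hhead]; exact (hsh (by omega)).2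
        rw [← gath_id cs _ hrows', gath_iterate cs _ _ h6 h4]
        have hmod : times.toNat % 4 = 0 := by
          rw [if_pos ht, PySem.Int.mod_eq_emod_of_pos (by norm_num)] at hk
          omega
        have : ∀ c, srcStep^[times.toNat] c = c := by
          intro c
          rw [srcStep_iter_mod, hmod]
          rfl
        rw [show (fun c => srcStep^[times.toNat] c) = (fun c : Nat × Nat => c) from funext this]
      · have ht0 : times.toNat = 0 := by omega
        rw [ht0]
        rfl
    · -- at least one effective rotation: patch the 12 cells
      have ht : 0 < times := by
        by_contra hc
        exact hk (by rw [if_neg hc])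
      have h6 : 6 ≤ cs.length := (hsh (by omega)).1
      have h4 : 4 ≤ (PySem.List.pyGetD cs 0 ([]:List Int)).length := by
        rw [hhead]; exact (hsh (by omega)).2
      rw [if_pos hk]
      rw [← gath_id cs _ hrows', gath_iterate cs _ _ h6 h4,
          patch_gath cs _ _ _ h6 h4]
      have hkk : (if 0 < times then PySem.Int.mod times 4 else 0).toNat = times.toNat % 4 := by
        rw [if_pos ht, PySem.Int.mod_eq_emod_of_pos (by norm_num)]
        omega
      rw [hkk]
      congr 1
      funext c
      exact srcStep_iter_mod times.toNat c
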